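-- pv_equiv track=rewrite | github.com/StasPI/Stepik.org | классы(наследование(функция рекурсия)).py | search
-- ===== SOURCE A (Python) =====
-- def search(scopes, parent, heir):
--     if heir in scopes[parent]['parent']:
--         return 'Yes'
--     elif parent == heir:
--         return 'Yes'
--     else:
--         for element in scopes[parent]['parent']:
--             try:
--                 parent = scopes[element]['parent']
--             except KeyError:
--                 return 'No'
--             return search(scopes, element, heir)
--     return 'No'
-- ===== SOURCE B (Python) =====
-- def search(scopes, parent, heir):
--     # phase 1: collect every ancestor name along the first-parent chain into one list
--     parents = scopes[parent]['parent']   # an unknown starting scope is an error (KeyError), as in the recursive version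
--     if parent == heir:
--         return 'Yes'
--     ancestors = list(parents)
--     for _ in range(len(scopes) + 1):     # a genuine chain has at most len(scopes) links; the bound only guards against cycles
--         if not parents:
--             break
--         entry = scopes.get(parents[0])
--         if entry is None or 'parent' not in entry:
--             break
--         parents = entry['parent']
--         ancestors += parents
--     # phase 2: one membership test decides
--     return 'Yes' if heir in ancestors else 'No'
-- ===== Notes on version B (the rewrite author's own statement) =====
-- stated objective: alternative
-- what changed: Replaced A's per-node tail recursion (testing heir at every step and guarding the next lookup with try/except) by a two-phase iterative algorithm: a bounded loop first collects all ancestor lists along the first-parent chain into one list, then a single membership test decides.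
import Mathlib
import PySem

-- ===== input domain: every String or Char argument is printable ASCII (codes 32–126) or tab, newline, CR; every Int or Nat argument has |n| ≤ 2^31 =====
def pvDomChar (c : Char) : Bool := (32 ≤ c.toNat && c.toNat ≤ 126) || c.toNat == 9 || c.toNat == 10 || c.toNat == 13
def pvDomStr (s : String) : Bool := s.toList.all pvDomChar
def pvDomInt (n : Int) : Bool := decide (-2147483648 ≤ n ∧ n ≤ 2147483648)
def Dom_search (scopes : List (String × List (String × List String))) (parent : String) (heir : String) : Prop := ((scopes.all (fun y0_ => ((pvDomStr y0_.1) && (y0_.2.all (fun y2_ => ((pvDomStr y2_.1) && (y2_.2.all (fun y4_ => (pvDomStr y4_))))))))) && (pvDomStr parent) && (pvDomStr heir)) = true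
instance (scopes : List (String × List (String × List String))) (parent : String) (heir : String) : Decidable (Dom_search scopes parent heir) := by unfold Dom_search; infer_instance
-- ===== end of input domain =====

-- B replaces A's per-node tail recursion by a two-phase iterative algorithm: a bounded loop
-- first collects all ancestor lists along the first-parent chain, then one membership test
-- decides (objective: alternative).

-- ===== PORT A =====
-- dict lookup (first match) on the association list
def pvGet {α : Type} (d : List (String × α)) (k : String) : Option α :=
  (d.find? (fun p => p.1 == k)).map (·.2)

-- fuel only makes A's recursion total in Lean; Pre_search excludes the inputs (cyclic first-parent
-- chains) on which Python A never returns (RecursionError), so fuel never runs out inside Pre_.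
-- scopes[parent]['parent'] raises KeyError when the lookup fails; Pre_search excludes that case,
-- where the port defaults to [] (comment: exact on Pre_, Python raises there).
def searchA : Nat → List (String × List (String × List String)) → String → String → String
  | 0, _, _, _ => "No"
  | Nat.succ n, scopes, parent, heir =>
    let lst := ((pvGet scopes parent).bind (fun d => pvGet d "parent")).getD []
    if heir ∈ lst then "Yes"
    else if parent = heir then "Yes"
    else
      match lst with
      | [] => "No"
      | element :: _ =>
        match (pvGet scopes element).bind (fun d => pvGet d "parent") with
        | none => "No"                          -- except KeyError: return 'No'
        | some _ => searchA n scopes element heir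

def search (scopes : List (String × List (String × List String))) (parent : String) (heir : String) : String :=
  searchA (scopes.length + 2) scopes parent heir

-- ===== PORT B =====
-- phase 1 of Source B: the bounded for-loop over the state (parents, ancestors); the fuel IS
-- Source B's explicit bound range(len(scopes) + 1)
def collectAnc (scopes : List (String × List (String × List String))) :
    Nat → List String → List String → List String
  | 0, _, anc => anc
  | Nat.succ n, parents, anc =>
    match parents with
    | [] => anc                                 -- not parents: break
    | e :: _ =>
      match pvGet scopes e with
      | none => anc                             -- entry is None: break
      | some entry =>
        match pvGet entry "parent" with
        | none => anc                           -- 'parent' not in entry: break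
        | some ps => collectAnc scopes n ps (anc ++ ps)   -- parents = entry['parent']; ancestors += parents

def search_alt (scopes : List (String × List (String × List String))) (parent : String) (heir : String) : String :=
  match (pvGet scopes parent).bind (fun d => pvGet d "parent") with
  | none => "No"                                -- Python B raises KeyError here; Pre_search excludes this case
  | some parents =>
    if parent = heir then "Yes"
    else if heir ∈ collectAnc scopes (scopes.length + 1) parents parents then "Yes" else "No"

-- ===== PRECONDITION & SPEC =====
-- one step of the first-parent chain: the head of the current node's parent list
def pvChainStep (scopes : List (String × List (String × List String))) (o : Option String) : Option String :=
  o.bind (fun x => ((pvGet scopes x).bind (fun d => pvGet d "parent")).bind List.head?)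

-- chain stop: the chain has run out (A returns 'No') or heir sits in the current parent list ('Yes')
def pvStops (scopes : List (String × List (String × List String))) (heir : String) (o : Option String) : Bool :=
  match o with
  | none => true
  | some p => decide (heir ∈ ((pvGet scopes p).bind (fun d => pvGet d "parent")).getD [])

-- Pre_ excludes exactly the inputs where Python A raises: a KeyError on the initial
-- scopes[parent]['parent'] lookup, or a cyclic first-parent chain that never reaches a stop,
-- on which A recurses forever (RecursionError). A returns on every input satisfying Pre_.
def Pre_search (scopes : List (String × List (String × List String))) (parent : String) (heir : String) : Prop :=
  ((pvGet scopes parent).bind (fun d => pvGet d "parent")).isSome = true ∧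
  (parent = heir ∨
    ∃ n ∈ List.range (scopes.length + 2), pvStops scopes heir ((pvChainStep scopes)^[n] (some parent)) = true)

instance (scopes : List (String × List (String × List String))) (parent : String) (heir : String) : Decidable (Pre_search scopes parent heir) := by unfold Pre_search; infer_instance

def pvWitness_search : (List (String × List (String × List String))) × String × String :=
  ([("a", [("parent", ["b"])]), ("b", [("parent", [])])], "a", "c")

def Spec_search (scopes : List (String × List (String × List String))) (parent : String) (heir : String) (out : String) : Prop := out = search_alt scopes parent heir
instance (scopes : List (String × List (String × List String))) (parent : String) (heir : String) (out : String) : Decidable (Spec_search scopes parent heir out) := by unfold Spec_search; infer_instance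

-- ===== CLAIM (what is proved, stated in full; the proofs are below) =====
def Claim_equal_search : Prop := ∀ (scopes : List (String × List (String × List String))) (parent : String) (heir : String), Dom_search scopes parent heir → Pre_search scopes parent heir → Spec_search scopes parent heir (search scopes parent heir)

-- ===== LEMMAS AND PROOFS =====

-- the accumulator only grows
theorem mem_collectAnc (scopes : List (String × List (String × List String))) (x : String) :
    ∀ (n : Nat) (parents : List String) (anc : List String),
    x ∈ anc → x ∈ collectAnc scopes n parents anc := by
  intro n
  induction n with
  | zero => intro parents anc h; simpa [collectAnc] using h
  | succ n ih =>
    intro parents anc h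
    simp only [collectAnc]
    cases parents with
    | nil => exact h
    | cons e rest =>
      simp only []
      cases pvGet scopes e with
      | none => exact h
      | some entry =>
        simp only []
        cases pvGet entry "parent" with
        | none => exact h
        | some ps =>
          simp only []
          exact ih ps (anc ++ ps) (by simp [h])

-- with aligned fuel: A says 'Yes' from node p iff heir lies in B's collected ancestors
theorem searchA_yes_iff (scopes : List (String × List (String × List String))) (heir : String) :
    ∀ (n : Nat) (p : String) (parents anc : List String),
    (pvGet scopes p).bind (fun d => pvGet d "parent") = some parents → heir ∉ anc → p ≠ heir →
    (searchA (n + 1) scopes p heir = "Yes" ↔ heir ∈ collectAnc scopes n parents (anc ++ parents)) := by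
  intro n
  induction n with
  | zero =>
    intro p parents anc hsome hanc hne
    simp only [searchA, collectAnc, hsome, Option.getD_some]
    by_cases hmem : heir ∈ parents
    · simp [hmem]
    · simp only [if_neg hmem, if_neg hne]
      have hout : heir ∉ anc ++ parents := by
        simp only [List.mem_append]
        intro hx; rcases hx with hx | hx
        · exact hanc hx
        · exact hmem hx
      cases parents with
      | nil => simp [hanc]
      | cons e rest =>
        simp only []
        cases (pvGet scopes e).bind (fun d => pvGet d "parent") with
        | none => simp [hout]
        | some q => simp [hout]
  | succ n ih =>
    intro p parents anc hsome hanc hne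
    simp only [searchA, hsome, Option.getD_some]
    by_cases hmem : heir ∈ parents
    · simp only [if_pos hmem]
      constructor
      · intro _
        exact mem_collectAnc scopes heir (n + 1) parents (anc ++ parents) (by simp [hmem])
      · intro _; trivial
    · simp only [if_neg hmem, if_neg hne]
      have hout : heir ∉ anc ++ parents := by
        simp only [List.mem_append]
        intro hx; rcases hx with hx | hx
        · exact hanc hx
        · exact hmem hx
      cases parents with
      | nil => simp [collectAnc, hanc]
      | cons e rest =>
        have he : e ≠ heir := by
          intro hx; exact hmem (by simp [hx])
        simp only [collectAnc]
        cases hs : (pvGet scopes e).bind (fun d => pvGet d "parent") with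
        | none =>
          cases hg : pvGet scopes e with
          | none => simp [hout]
          | some entry =>
            cases hp : pvGet entry "parent" with
            | none => simp [hp, hout]
            | some q => simp [hg, hp] at hs
        | some ps =>
          cases hg : pvGet scopes e with
          | none => simp [hg] at hs
          | some entry =>
            cases hp : pvGet entry "parent" with
            | none => simp [hg, hp] at hs
            | some q =>
              have hq : q = ps := by simpa [hg, hp] using hs
              subst hq
              have hrec := ih e q (anc ++ (e :: rest)) hs hout he
              simp only [searchA, hg, hp, Option.getD_some, Option.bind_some] at hrec ⊢
              exact hrec

-- A only ever answers 'Yes' or 'No'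
theorem searchA_yes_or_no (scopes : List (String × List (String × List String))) (heir : String) :
    ∀ (n : Nat) (p : String), searchA n scopes p heir = "Yes" ∨ searchA n scopes p heir = "No" := by
  intro n
  induction n with
  | zero => intro p; right; rfl
  | succ n ih =>
    intro p
    simp only [searchA]
    split_ifs
    · left; rfl
    · left; rfl
    · match ((pvGet scopes p).bind (fun d => pvGet d "parent")).getD [] with
      | [] => right; rfl
      | element :: tl =>
        simp only []
        cases (pvGet scopes element).bind (fun d => pvGet d "parent") with
        | none => right; rfl
        | some q => exact ih element

-- when the node equals heir, A answers 'Yes' at once (both its first branches say 'Yes')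
theorem searchA_self (n : Nat) (scopes : List (String × List (String × List String)))
    (heir : String) : searchA (n + 1) scopes heir heir = "Yes" := by
  simp only [searchA]
  split_ifs <;> rfl

-- ===== VERDICT (by name: the statement is the Claim_ definition above) =====
theorem search_spec : Claim_equal_search := by
  intro scopes parent heir _ hpre
  obtain ⟨hsome, -⟩ := hpre
  unfold Spec_search search search_alt
  cases hs : (pvGet scopes parent).bind (fun d => pvGet d "parent") with
  | none => simp [hs] at hsome
  | some parents =>
    simp only []
    by_cases h : parent = heir
    · subst h
      rw [if_pos rfl]
      exact searchA_self (scopes.length + 1) scopes parent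
    · rw [if_neg h]
      have hiff := searchA_yes_iff scopes heir (scopes.length + 1) parent parents [] hs (by simp) h
      simp only [List.nil_append] at hiff
      by_cases hm : heir ∈ collectAnc scopes (scopes.length + 1) parents parents
      · rw [if_pos hm]
        exact hiff.mpr hm
      · rw [if_neg hm]
        rcases searchA_yes_or_no scopes heir (scopes.length + 2) parent with hy | hn
        · exact absurd (hiff.mp hy) hm
        · exact hn
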